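-- pv_equiv track=rewrite | github.com/olga3n/adventofcode | 2022/day_20_grove_positioning_system_2.py | mix_process
-- ===== SOURCE A (Python) =====
-- from typing import List, Tuple
--
-- def mix_process(numbers: List[int], cnt: int = 10) -> List[int]:
--     pairs = list(zip(range(len(numbers)), numbers))
--
--     for _ in range(cnt):
--         for i in range(len(pairs)):
--             value = numbers[i]
--             index = pairs.index((i, value))
--             rest = pairs[index + 1:] + pairs[:index]
--             if value > 0:
--                 shift = value % (len(numbers) - 1)
--                 pairs = rest[:shift] + [pairs[index]] + rest[shift:]
--             elif value < 0:
--                 shift = abs(value) % (len(numbers) - 1)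
--                 pairs = rest[:-shift] + [pairs[index]] + rest[-shift:]
--
--     return [x[1] for x in pairs]
-- ===== SOURCE B (Python) =====
-- def mix_process(numbers, cnt=10):
--     # Position-array algorithm: never materialises the mixed list. pos[i] is the
--     # current position of numbers[i] in A's (rotated) linear list; each move is a
--     # coordinate transform applied to every position, and the answer is built by
--     # one final scatter.
--     n = len(numbers)
--     pos = list(range(n))
--     for _ in range(cnt):
--         for i in range(n):
--             v = numbers[i]
--             if v == 0:
--                 continue
--             s = v % (n - 1)
--             j = pos[i]
--             for x in range(n):
--                 if x == i:
--                     continue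
--                 r = (pos[x] - j - 1) % n
--                 pos[x] = r + 1 if r >= s else r
--             pos[i] = s
--     out = [0] * n
--     for i in range(n):
--         out[pos[i]] = numbers[i]
--     return out
-- ===== Notes on version B (the rewrite author's own statement) =====
-- stated objective: alternative
-- what changed: B never materialises the mixed list: instead of locating each element with list.index and rebuilding the list by slicing/rotation as A does, it maintains the inverse permutation (a position array), performs each move as a modular coordinate transform applied to every element's position, and produces the answer with a single final scatter.
import Mathlib
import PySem

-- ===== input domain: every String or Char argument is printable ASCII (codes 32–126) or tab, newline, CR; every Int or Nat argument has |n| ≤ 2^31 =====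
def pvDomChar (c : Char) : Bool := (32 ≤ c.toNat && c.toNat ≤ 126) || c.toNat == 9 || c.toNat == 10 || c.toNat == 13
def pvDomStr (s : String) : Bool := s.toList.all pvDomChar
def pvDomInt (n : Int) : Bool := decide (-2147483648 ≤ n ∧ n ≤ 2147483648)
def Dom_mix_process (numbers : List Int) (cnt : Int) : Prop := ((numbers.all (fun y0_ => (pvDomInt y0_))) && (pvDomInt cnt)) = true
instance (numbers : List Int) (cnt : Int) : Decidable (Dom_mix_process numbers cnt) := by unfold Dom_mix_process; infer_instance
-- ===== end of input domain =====

-- B never materialises the mixed list: it keeps the inverse permutation (a position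
-- array), applies a modular coordinate transform to every position per move, and
-- builds the answer with one final scatter (alternative algorithm, same cost).

-- ===== PORT A =====
-- one iteration of A's inner loop body (the 'none' match arm is Python's ValueError from
-- pairs.index, unreachable: the searched pair is always present)
def mixStepA (numbers : List Int) (pairs : List (Int × Int)) (i : Int) : List (Int × Int) :=
  let value := PySem.List.pyGetD numbers i 0
  match PySem.List.index? pairs (i, value) with
  | none => pairs
  | some index =>
    let rest := PySem.List.slice pairs (some ((index : Int) + 1)) none ++
                PySem.List.slice pairs none (some (index : Int))
    if value > 0 then
      let shift := PySem.Int.mod value ((numbers.length : Int) - 1)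
      PySem.List.slice rest none (some shift) ++ [PySem.List.pyGetD pairs (index : Int) (0, 0)] ++
        PySem.List.slice rest (some shift) none
    else if value < 0 then
      let shift := PySem.Int.mod |value| ((numbers.length : Int) - 1)
      PySem.List.slice rest none (some (-shift)) ++ [PySem.List.pyGetD pairs (index : Int) (0, 0)] ++
        PySem.List.slice rest (some (-shift)) none
    else pairs

def mixRoundA (numbers : List Int) (pairs : List (Int × Int)) : List (Int × Int) :=
  (PySem.List.pyRange 0 ((pairs.length : Int)) 1).foldl (mixStepA numbers) pairs

def mix_process (numbers : List Int) (cnt : Int) : List Int :=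
  ((PySem.List.pyRange 0 cnt 1).foldl (fun pairs _ => mixRoundA numbers pairs)
      (List.zip (PySem.List.pyRange 0 ((numbers.length : Int)) 1) numbers)).map (fun x => x.2)

-- ===== PORT B =====
-- one move of B: pos[x] (0 ≤ x < n) is written exactly once, with x in range — pySetD is
-- exact there; Python's '%' is PySem.Int.mod
def posStepB (numbers : List Int) (pos : List Int) (i : Int) : List Int :=
  let v := PySem.List.pyGetD numbers i 0
  if v = 0 then pos
  else
    let n : Int := (numbers.length : Int)
    let s := PySem.Int.mod v (n - 1)
    let j := PySem.List.pyGetD pos i 0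
    let pos1 := (PySem.List.pyRange 0 n 1).foldl
      (fun p x =>
        if x = i then p
        else
          let r := PySem.Int.mod (PySem.List.pyGetD p x 0 - j - 1) n
          PySem.List.pySetD p x (if s ≤ r then r + 1 else r)) pos
    PySem.List.pySetD pos1 i s

def mix_process_alt (numbers : List Int) (cnt : Int) : List Int :=
  let n : Int := (numbers.length : Int)
  let pos := (PySem.List.pyRange 0 cnt 1).foldl
    (fun pos _ => (PySem.List.pyRange 0 n 1).foldl (posStepB numbers) pos)
    (PySem.List.pyRange 0 n 1)
  (PySem.List.pyRange 0 n 1).foldl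
    (fun out i => PySem.List.pySetD out (PySem.List.pyGetD pos i 0) (PySem.List.pyGetD numbers i 0))
    (PySem.List.pyRepeat [0] n)

-- ===== PRECONDITION & SPEC =====
-- Pre_ excludes exactly the inputs where A raises ZeroDivisionError (modulus len-1 = 0):
-- a single-element list whose element is nonzero, mixed at least once; B raises there too.
def Pre_mix_process (numbers : List Int) (cnt : Int) : Prop :=
  ¬ (numbers.length = 1 ∧ 1 ≤ cnt ∧ numbers ≠ [0])
instance (numbers : List Int) (cnt : Int) : Decidable (Pre_mix_process numbers cnt) := by
  unfold Pre_mix_process; infer_instance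

def pvWitness_mix_process : List Int × Int := ([4, -3, 0, 7, -13], 10)

def Spec_mix_process (numbers : List Int) (cnt : Int) (out : List Int) : Prop := out = mix_process_alt numbers cnt
instance (numbers : List Int) (cnt : Int) (out : List Int) : Decidable (Spec_mix_process numbers cnt out) := by unfold Spec_mix_process; infer_instance

-- ===== CLAIM (what is proved, stated in full; the proofs are below) =====
def Claim_equal_mix_process : Prop := ∀ (numbers : List Int) (cnt : Int), Dom_mix_process numbers cnt → Pre_mix_process numbers cnt → Spec_mix_process numbers cnt (mix_process numbers cnt)

-- ===== LEMMAS AND PROOFS =====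

-- the GHOST order list: the sequence of original indices in A's current pairs list,
-- used only by the proofs (neither port computes it)
def gStep (numbers : List Int) (o : List Int) (i : Int) : List Int :=
  if PySem.List.pyGetD numbers i 0 = 0 then o
  else
    match PySem.List.index? o i with
    | none => o
    | some j =>
      let rest := o.drop (j + 1) ++ o.take j
      let s := (PySem.Int.mod (PySem.List.pyGetD numbers i 0) ((numbers.length : Int) - 1)).toNat
      rest.take s ++ i :: rest.drop s

def gRound (numbers : List Int) (o : List Int) : List Int :=
  (PySem.List.pyRange 0 ((numbers.length : Int)) 1).foldl (gStep numbers) o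

def gFinal (numbers : List Int) (cnt : Int) : List Int :=
  (PySem.List.pyRange 0 cnt 1).foldl (fun o _ => gRound numbers o)
    (PySem.List.pyRange 0 ((numbers.length : Int)) 1)

def pvF (numbers : List Int) (i : Int) : Int × Int := (i, PySem.List.pyGetD numbers i 0)

-- [0, 1, …, n-1] as integers, recursively (proof-side image of list(range(n)))
def pvCast : Nat → List Int
  | 0 => []
  | n + 1 => pvCast n ++ [(n : Int)]

-- B's invariant: pos is the inverse of the ghost order list
def pvInv (o pos : List Int) : Prop :=
  ∀ k (hk : k < o.length), pos[(o[k]).toNat]? = some (k : Int)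

theorem pv_pyRange_cast (n : Nat) : PySem.List.pyRange 0 (n : Int) 1 = pvCast n := by
  induction n with
  | zero => rfl
  | succ m ih =>
    rw [show ((m + 1 : Nat) : Int) = (m : Int) + 1 by push_cast; ring,
        PySem.List.pyRange_one_succ_right (by positivity), ih]
    rfl

theorem pv_getD_of_some (xs : List Int) {e : Int} (d : Int) {r : Int} (h0 : 0 ≤ e)
    (h : xs[e.toNat]? = some r) : PySem.List.pyGetD xs e d = r := by
  obtain ⟨hlt, hval⟩ := List.getElem?_eq_some_iff.1 h
  rw [PySem.List.pyGetD_eq_getElem _ _ h0 (by omega)]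
  exact hval

-- a fold preserves any relation its step preserves
theorem pv_foldl_rel {α β γ : Type} (l : List α) (fA : β → α → β) (fB : γ → α → γ)
    (R : β → γ → Prop) (h : ∀ b c x, x ∈ l → R b c → R (fA b x) (fB c x)) :
    ∀ b c, R b c → R (l.foldl fA b) (l.foldl fB c) := by
  induction l with
  | nil => intro b c hbc; exact hbc
  | cons x t ih =>
    intro b c hbc
    exact ih (fun b c y hy => h b c y (List.mem_cons_of_mem _ hy)) _ _
      (h b c x List.mem_cons_self hbc)

theorem pv_zip_init (l : List Int) :
    List.zip (PySem.List.pyRange 0 ((l.length : Int)) 1) l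
      = (PySem.List.pyRange 0 ((l.length : Int)) 1).map (pvF l) := by
  apply List.ext_getElem
  · simp [PySem.List.length_pyRange_one]
  · intro k h1 h2
    have hk : k < l.length := by
      simpa [PySem.List.length_pyRange_one] using h1
    simp [List.getElem_zip, PySem.List.getElem_pyRange_one, pvF, List.getElem?_eq_getElem hk]

theorem pv_index?_map (l : List Int) (g : Int → Int) (i : Int) :
    PySem.List.index? (l.map (fun x => (x, g x))) (i, g i) = PySem.List.index? l i := by
  induction l with
  | nil => rfl
  | cons a t ih =>
    by_cases ha : a = i
    · subst ha
      rw [List.map_cons, PySem.List.index?_cons_self, PySem.List.index?_cons_self]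
    · rw [List.map_cons,
          PySem.List.index?_cons_of_ne _ (show ((a, g a) : Int × Int) ≠ (i, g i) by simp [ha]),
          PySem.List.index?_cons_of_ne _ ha, ih]

-- mod arithmetic relating A's |v| % m to B's v % m for v < 0
theorem pv_mod_neg (v m : Int) (hm : 0 < m) (hv : v < 0) :
    (PySem.Int.mod |v| m = 0 ∧ PySem.Int.mod v m = 0) ∨
    (0 < PySem.Int.mod |v| m ∧ PySem.Int.mod v m = m - PySem.Int.mod |v| m) := by
  rw [abs_of_neg hv, PySem.Int.mod_eq_emod_of_pos hm, PySem.Int.mod_eq_emod_of_pos hm]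
  have hp0 : 0 ≤ v % m := Int.emod_nonneg _ (by omega)
  have hplt : v % m < m := Int.emod_lt_of_pos _ hm
  have hs0 : 0 ≤ (-v) % m := Int.emod_nonneg _ (by omega)
  have hslt : (-v) % m < m := Int.emod_lt_of_pos _ hm
  have hdv : (v % m + (-v) % m) % m = 0 := by
    rw [← Int.add_emod]
    simp
  rcases lt_or_ge (v % m + (-v) % m) m with h | h
  · have := Int.emod_eq_of_lt (by omega) h
    omega
  · have h2 : (v % m + (-v) % m - m) % m = 0 := by
      rw [Int.sub_emod, hdv, Int.emod_self]
      simp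
    have h4 := Int.emod_eq_of_lt (show (0:Int) ≤ v % m + (-v) % m - m by omega)
      (show v % m + (-v) % m - m < m by omega)
    omega

-- A's step is the ghost step, mapped through pvF (and the ghost stays a permutation)
theorem pv_step (numbers : List Int) (h1 : numbers.length = 1 → numbers = [0])
    (order : List Int) (i : Int)
    (hperm : order.Perm (PySem.List.pyRange 0 ((numbers.length : Int)) 1))
    (hi0 : 0 ≤ i) (hin : i < (numbers.length : Int)) :
    mixStepA numbers (order.map (pvF numbers)) i = (gStep numbers order i).map (pvF numbers)
      ∧ (gStep numbers order i).Perm (PySem.List.pyRange 0 ((numbers.length : Int)) 1) := by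
  have hlen : order.length = numbers.length := by
    simpa [PySem.List.length_pyRange_one] using hperm.length_eq
  by_cases hv : PySem.List.pyGetD numbers i 0 = 0
  · refine ⟨?_, by simpa [gStep, hv] using hperm⟩
    simp only [gStep, hv, if_pos]
    simp only [mixStepA, hv]
    cases PySem.List.index? (order.map (pvF numbers)) (i, (0 : Int)) <;> simp
  · -- value ≠ 0
    have hn2 : 2 ≤ numbers.length := by
      by_contra hle
      have hl1 : numbers.length = 1 := by
        have hpos : 0 < numbers.length := by
          by_contra h0
          have : numbers.length = 0 := by omega
          rw [this] at hin
          omega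
        omega
      have h0 := h1 hl1
      subst h0
      have : i = 0 := by
        simp at hin
        omega
      subst this
      simp [PySem.List.pyGetD_zero_cons] at hv
    have hmpos : (0 : Int) < (numbers.length : Int) - 1 := by
      have : (2 : Int) ≤ (numbers.length : Int) := by exact_mod_cast hn2
      omega
    have hiord : i ∈ order := hperm.mem_iff.2 (PySem.List.mem_pyRange_one.2 ⟨hi0, hin⟩)
    obtain ⟨j, hj⟩ := Option.isSome_iff_exists.1 ((PySem.List.index?_isSome_iff order i).2 hiord)
    obtain ⟨hjlt, hgetj, -⟩ := PySem.List.getElem_of_index?_eq_some hj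
    have hidxA : PySem.List.index? (order.map (pvF numbers)) (i, PySem.List.pyGetD numbers i 0) = some j := by
      have h := pv_index?_map order (fun x => PySem.List.pyGetD numbers x 0) i
      simpa [pvF] using h.trans hj
    have hrBlen : (order.drop (j+1) ++ order.take j).length = numbers.length - 1 := by
      simp
      omega
    have hp0 : 0 ≤ PySem.Int.mod (PySem.List.pyGetD numbers i 0) ((numbers.length : Int) - 1) :=
      PySem.Int.mod_nonneg _ hmpos
    have hBeq : gStep numbers order i =
        (order.drop (j+1) ++ order.take j).take
            (PySem.Int.mod (PySem.List.pyGetD numbers i 0) ((numbers.length : Int) - 1)).toNat ++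
          i :: (order.drop (j+1) ++ order.take j).drop
            (PySem.Int.mod (PySem.List.pyGetD numbers i 0) ((numbers.length : Int) - 1)).toNat := by
      simp only [gStep, hj]
      rw [if_neg hv]
    -- A's step in the same take/cons/drop form, mapped through pvF
    have hX : List.drop (j+1) (order.map (pvF numbers)) ++ List.take j (order.map (pvF numbers))
        = (order.drop (j+1) ++ order.take j).map (pvF numbers) := by
      simp [List.map_append, List.map_drop, List.map_take]
    have hAmap : mixStepA numbers (order.map (pvF numbers)) i =
        ((order.drop (j+1) ++ order.take j).map (pvF numbers)).take
            (PySem.Int.mod (PySem.List.pyGetD numbers i 0) ((numbers.length : Int) - 1)).toNat ++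
          pvF numbers i :: ((order.drop (j+1) ++ order.take j).map (pvF numbers)).drop
            (PySem.Int.mod (PySem.List.pyGetD numbers i 0) ((numbers.length : Int) - 1)).toNat := by
      simp only [mixStepA, hidxA]
      rw [show ((j : Int) + 1) = (((j + 1 : Nat)) : Int) by push_cast; ring]
      rw [PySem.List.slice_from_natCast, PySem.List.slice_to_natCast, hX]
      rw [PySem.List.pyGetD_eq_getElem _ _ (by exact_mod_cast Nat.zero_le j)
            (show ((j : Int)) < ((order.map (pvF numbers)).length : Int) by
              simp only [List.length_map]
              exact_mod_cast hjlt)]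
      simp only [Int.toNat_natCast, List.getElem_map, hgetj]
      rcases lt_trichotomy (PySem.List.pyGetD numbers i 0) 0 with hneg | h00 | hpos
      · rw [if_neg (by omega), if_pos hneg]
        rcases pv_mod_neg _ _ hmpos hneg with ⟨hs0, hq0⟩ | ⟨hspos, hqeq⟩
        · rw [hs0, hq0]
          simp only [neg_zero]
          rw [PySem.List.slice_to _ le_rfl, PySem.List.slice_from _ le_rfl]
          simp
        · have hslt : PySem.Int.mod |PySem.List.pyGetD numbers i 0| ((numbers.length : Int) - 1)
              < (numbers.length : Int) - 1 := PySem.Int.mod_lt _ hmpos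
          rw [show -(PySem.Int.mod |PySem.List.pyGetD numbers i 0| ((numbers.length : Int) - 1))
                = -(((PySem.Int.mod |PySem.List.pyGetD numbers i 0|
                      ((numbers.length : Int) - 1)).toNat : Nat) : Int) by omega]
          rw [PySem.List.slice_to_neg_natCast _ _ (by omega),
              PySem.List.slice_from_neg_natCast _ _ (by omega)]
          have hXlen : (((order.drop (j+1) ++ order.take j)).map (pvF numbers)).length
              = numbers.length - 1 := by
            simp only [List.length_map]
            exact hrBlen
          rw [hXlen]
          rw [show numbers.length - 1
                - (PySem.Int.mod |PySem.List.pyGetD numbers i 0|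
                    ((numbers.length : Int) - 1)).toNat
              = (PySem.Int.mod (PySem.List.pyGetD numbers i 0)
                  ((numbers.length : Int) - 1)).toNat by omega]
          simp
      · exact absurd h00 hv
      · rw [if_pos hpos]
        rw [PySem.List.slice_to _ hp0, PySem.List.slice_from _ hp0]
        simp
    constructor
    · rw [hAmap, hBeq]
      simp [List.map_append, List.map_take, List.map_drop, pvF]
    · rw [hBeq]
      have horder : order = order.take j ++ i :: order.drop (j+1) := by
        conv_lhs => rw [← List.take_append_drop j order]
        rw [List.drop_eq_getElem_cons hjlt, hgetj]
      have e1 : ((order.drop (j+1) ++ order.take j).take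
            (PySem.Int.mod (PySem.List.pyGetD numbers i 0) ((numbers.length : Int) - 1)).toNat ++
          i :: (order.drop (j+1) ++ order.take j).drop
            (PySem.Int.mod (PySem.List.pyGetD numbers i 0) ((numbers.length : Int) - 1)).toNat).Perm
          (i :: ((order.drop (j+1) ++ order.take j).take
            (PySem.Int.mod (PySem.List.pyGetD numbers i 0) ((numbers.length : Int) - 1)).toNat ++
          (order.drop (j+1) ++ order.take j).drop
            (PySem.Int.mod (PySem.List.pyGetD numbers i 0) ((numbers.length : Int) - 1)).toNat)) :=
        List.perm_middle
      rw [List.take_append_drop] at e1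
      have e2 : (i :: (order.drop (j+1) ++ order.take j)).Perm
          (i :: (order.take j ++ order.drop (j+1))) := List.Perm.cons i List.perm_append_comm
      have e3 : (order.take j ++ i :: order.drop (j+1)).Perm
          (i :: (order.take j ++ order.drop (j+1))) := List.perm_middle
      have hfin : (order.take j ++ i :: order.drop (j+1)).Perm
          (PySem.List.pyRange 0 ((numbers.length : Int)) 1) := by
        rw [← horder]; exact hperm
      exact ((e1.trans e2).trans e3.symm).trans hfin

theorem pv_round (numbers : List Int) (h1 : numbers.length = 1 → numbers = [0])
    (pairs : List (Int × Int)) (order : List Int)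
    (hEq : pairs = order.map (pvF numbers))
    (hperm : order.Perm (PySem.List.pyRange 0 ((numbers.length : Int)) 1)) :
    mixRoundA numbers pairs = (gRound numbers order).map (pvF numbers)
      ∧ (gRound numbers order).Perm (PySem.List.pyRange 0 ((numbers.length : Int)) 1) := by
  subst hEq
  have hlen : order.length = numbers.length := by
    simpa [PySem.List.length_pyRange_one] using hperm.length_eq
  have hR := pv_foldl_rel (PySem.List.pyRange 0 ((numbers.length : Int)) 1)
      (mixStepA numbers) (gStep numbers)
      (fun p o => p = o.map (pvF numbers)
        ∧ o.Perm (PySem.List.pyRange 0 ((numbers.length : Int)) 1))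
      (fun b c x hx hbc => by
        obtain ⟨rfl, hp⟩ := hbc
        obtain ⟨hx1, hx2⟩ := PySem.List.mem_pyRange_one.1 hx
        exact pv_step numbers h1 c x hp hx1 hx2)
      _ _ ⟨rfl, hperm⟩
  unfold mixRoundA gRound
  rw [show (((order.map (pvF numbers)).length : Int)) = ((numbers.length : Int)) by
    simp [hlen]]
  exact hR

-- A = map of the ghost (assembled), together with the ghost's permutation property
theorem pv_A (numbers : List Int) (cnt : Int)
    (h1 : 1 ≤ cnt → numbers.length = 1 → numbers = [0]) :
    mix_process numbers cnt = (gFinal numbers cnt).map (fun e => PySem.List.pyGetD numbers e 0)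
      ∧ (gFinal numbers cnt).Perm (PySem.List.pyRange 0 ((numbers.length : Int)) 1) := by
  unfold mix_process gFinal
  have hinit : List.zip (PySem.List.pyRange 0 ((numbers.length : Int)) 1) numbers
        = (PySem.List.pyRange 0 ((numbers.length : Int)) 1).map (pvF numbers)
      ∧ (PySem.List.pyRange 0 ((numbers.length : Int)) 1).Perm
          (PySem.List.pyRange 0 ((numbers.length : Int)) 1) :=
    ⟨pv_zip_init numbers, List.Perm.refl _⟩
  have hfin : (PySem.List.pyRange 0 cnt 1).foldl (fun pairs _ => mixRoundA numbers pairs)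
        (List.zip (PySem.List.pyRange 0 ((numbers.length : Int)) 1) numbers)
        = ((PySem.List.pyRange 0 cnt 1).foldl (fun o _ => gRound numbers o)
            (PySem.List.pyRange 0 ((numbers.length : Int)) 1)).map (pvF numbers)
      ∧ ((PySem.List.pyRange 0 cnt 1).foldl (fun o _ => gRound numbers o)
            (PySem.List.pyRange 0 ((numbers.length : Int)) 1)).Perm
          (PySem.List.pyRange 0 ((numbers.length : Int)) 1) := by
    rcases le_or_gt cnt 0 with hc | hc
    · rw [PySem.List.pyRange_one_eq_nil hc]
      simpa using hinit
    · exact pv_foldl_rel (PySem.List.pyRange 0 cnt 1)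
        (fun pairs _ => mixRoundA numbers pairs) (fun o _ => gRound numbers o)
        (fun p o => p = o.map (pvF numbers)
          ∧ o.Perm (PySem.List.pyRange 0 ((numbers.length : Int)) 1))
        (fun b c x _ hbc => pv_round numbers (h1 (by omega)) b c hbc.1 hbc.2) _ _ hinit
  refine ⟨?_, hfin.2⟩
  rw [hfin.1, List.map_map]
  rfl

-- writing each visited index exactly once, the inner pass is a pointwise map
theorem pv_innerFold (G : Int → Int) (i : Int) :
    ∀ (M : Nat) (pos : List Int), M ≤ pos.length →
      ((pvCast M).foldl
          (fun p x => if x = i then p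
            else PySem.List.pySetD p x (G (PySem.List.pyGetD p x 0))) pos).length = pos.length
      ∧ ∀ m : Nat,
          ((pvCast M).foldl
              (fun p x => if x = i then p
                else PySem.List.pySetD p x (G (PySem.List.pyGetD p x 0))) pos)[m]?
            = if m < M ∧ (m : Int) ≠ i then (pos[m]?).map G else pos[m]? := by
  intro M
  induction M with
  | zero =>
    intro pos _
    refine ⟨rfl, fun m => ?_⟩
    simp [pvCast]
  | succ M ih =>
    intro pos hM
    obtain ⟨ihlen, ihget⟩ := ih pos (by omega)
    rw [show pvCast (M + 1) = pvCast M ++ [(M : Int)] from rfl, List.foldl_append]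
    simp only [List.foldl_cons, List.foldl_nil]
    set resM := (pvCast M).foldl
      (fun p x => if x = i then p
        else PySem.List.pySetD p x (G (PySem.List.pyGetD p x 0))) pos with hres
    by_cases hMi : (M : Int) = i
    · rw [if_pos hMi]
      refine ⟨ihlen, fun m => ?_⟩
      rw [ihget m]
      by_cases hm : m = M
      · subst hm
        rw [if_neg (by omega), if_neg (fun h => h.2 hMi)]
      · by_cases hlt : m < M
        · by_cases hni : (m : Int) = i
          · rw [if_neg (fun h => h.2 hni), if_neg (fun h => h.2 hni)]
          · rw [if_pos ⟨hlt, hni⟩, if_pos ⟨by omega, hni⟩]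
        · rw [if_neg (by omega), if_neg (by omega)]
    · rw [if_neg hMi]
      have hMlen : M < resM.length := by omega
      have hgetM : PySem.List.pyGetD resM (M : Int) 0 = resM[M] := by
        rw [PySem.List.pyGetD_eq_getElem _ _ (by omega)
          (by exact_mod_cast hMlen)]
        simp
      have hresM : resM[M]? = pos[M]? := by
        rw [ihget M, if_neg (by omega)]
      have hposM : pos[M]? = some (pos[M]'(by omega)) := List.getElem?_eq_getElem _
      have hvalM : resM[M] = pos[M]'(by omega) := by
        have := hresM
        rw [List.getElem?_eq_getElem hMlen, hposM] at this
        exact Option.some.inj this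
      rw [PySem.List.pySetD_of_nonneg _ _ (by omega)]
      simp only [Int.toNat_natCast]
      refine ⟨by simpa using ihlen, fun m => ?_⟩
      by_cases hm : m = M
      · subst hm
        rw [List.getElem?_set_self hMlen]
        rw [hgetM, hvalM, hposM]
        rw [if_pos ⟨by omega, hMi⟩]
        simp
      · rw [List.getElem?_set_ne (by omega), ihget m]
        by_cases hlt : m < M
        · by_cases hni : (m : Int) = i
          · rw [if_neg (fun h => h.2 hni), if_neg (fun h => h.2 hni)]
          · rw [if_pos ⟨hlt, hni⟩, if_pos ⟨by omega, hni⟩]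
        · rw [if_neg (by omega), if_neg (by omega)]

theorem pv_rest_lo (o : List Int) (j t : Nat) (ht : t < o.length - 1 - j) :
    (o.drop (j + 1) ++ o.take j)[t]? = o[j + 1 + t]? := by
  rw [List.getElem?_append_left (by simp; omega), List.getElem?_drop]

theorem pv_rest_hi (o : List Int) (j t : Nat) (hj : j < o.length)
    (hge : o.length - 1 - j ≤ t) (ht : t < o.length - 1) :
    (o.drop (j + 1) ++ o.take j)[t]? = o[t - (o.length - 1 - j)]? := by
  rw [List.getElem?_append_right (by simp; omega)]
  rw [List.getElem?_take]
  rw [if_pos (by simp; omega)]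
  congr 1
  simp
  omega

-- B's move keeps pos the inverse of the ghost order
theorem pv_posStep (numbers : List Int) (h1 : numbers.length = 1 → numbers = [0])
    (o pos : List Int) (i : Int)
    (hperm : o.Perm (PySem.List.pyRange 0 ((numbers.length : Int)) 1))
    (hlen : pos.length = numbers.length)
    (hinv : pvInv o pos)
    (hi0 : 0 ≤ i) (hin : i < (numbers.length : Int)) :
    (posStepB numbers pos i).length = numbers.length
      ∧ pvInv (gStep numbers o i) (posStepB numbers pos i) := by
  have olen : o.length = numbers.length := by
    simpa [PySem.List.length_pyRange_one] using hperm.length_eq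
  have onodup : o.Nodup := (hperm.nodup_iff).2 (PySem.List.nodup_pyRange_one _ _)
  by_cases hv : PySem.List.pyGetD numbers i 0 = 0
  · constructor
    · simp [posStepB, hv, hlen]
    · simpa [gStep, posStepB, hv] using hinv
  · have hn2 : 2 ≤ numbers.length := by
      by_contra hle
      have hl1 : numbers.length = 1 := by
        have hpos : 0 < numbers.length := by
          by_contra h0
          have : numbers.length = 0 := by omega
          rw [this] at hin
          omega
        omega
      have h0 := h1 hl1
      subst h0
      have : i = 0 := by
        simp at hin
        omega
      subst this
      simp [PySem.List.pyGetD_zero_cons] at hv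
    have hmpos : (0 : Int) < (numbers.length : Int) - 1 := by
      have : (2 : Int) ≤ (numbers.length : Int) := by exact_mod_cast hn2
      omega
    have hiord : i ∈ o := hperm.mem_iff.2 (PySem.List.mem_pyRange_one.2 ⟨hi0, hin⟩)
    obtain ⟨j, hj⟩ := Option.isSome_iff_exists.1 ((PySem.List.index?_isSome_iff o i).2 hiord)
    obtain ⟨hjlt, hgetj, -⟩ := PySem.List.getElem_of_index?_eq_some hj
    have hjval : PySem.List.pyGetD pos i 0 = (j : Int) := by
      apply pv_getD_of_some pos 0 hi0
      have h := hinv j hjlt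
      rw [hgetj] at h
      exact h
    set sI := PySem.Int.mod (PySem.List.pyGetD numbers i 0) ((numbers.length : Int) - 1) with hsI
    have hs0 : 0 ≤ sI := PySem.Int.mod_nonneg _ hmpos
    have hslt : sI < (numbers.length : Int) - 1 := PySem.Int.mod_lt _ hmpos
    have hsN : (sI.toNat : Int) = sI := Int.toNat_of_nonneg hs0
    have hsNlt : sI.toNat < numbers.length - 1 := by omega
    set G : Int → Int := fun q =>
      if sI ≤ PySem.Int.mod (q - (j : Int) - 1) ((numbers.length : Int))
      then PySem.Int.mod (q - (j : Int) - 1) ((numbers.length : Int)) + 1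
      else PySem.Int.mod (q - (j : Int) - 1) ((numbers.length : Int)) with hG
    have hB : posStepB numbers pos i =
        ((pvCast numbers.length).foldl
          (fun p x => if x = i then p
            else PySem.List.pySetD p x (G (PySem.List.pyGetD p x 0))) pos).set i.toNat sI := by
      simp only [posStepB, hjval, ← hsI]
      rw [if_neg hv]
      rw [pv_pyRange_cast numbers.length, PySem.List.pySetD_of_nonneg _ _ hi0]
    obtain ⟨ihlen, ihget⟩ := pv_innerFold G i numbers.length pos (by omega)
    have hlen' : (posStepB numbers pos i).length = numbers.length := by
      rw [hB]
      rw [List.length_set, ihlen, hlen]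
    refine ⟨hlen', ?_⟩
    have hgperm := (pv_step numbers h1 o i hperm hi0 hin).2
    have hgnodup : (gStep numbers o i).Nodup :=
      (hgperm.nodup_iff).2 (PySem.List.nodup_pyRange_one _ _)
    have hgStep : gStep numbers o i =
        (o.drop (j + 1) ++ o.take j).take sI.toNat ++
          i :: (o.drop (j + 1) ++ o.take j).drop sI.toNat := by
      simp only [gStep, hj, ← hsI]
      rw [if_neg hv]
    have hrlen : (o.drop (j + 1) ++ o.take j).length = numbers.length - 1 := by
      simp
      omega
    have hglen : (gStep numbers o i).length = numbers.length := by
      simpa [PySem.List.length_pyRange_one] using hgperm.length_eq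
    have htakelen : ((o.drop (j + 1) ++ o.take j).take sI.toNat).length = sI.toNat := by
      simp
      omega
    have hgsN : (gStep numbers o i)[sI.toNat]? = some i := by
      rw [hgStep]
      rw [List.getElem?_append_right (by omega)]
      rw [show sI.toNat - ((o.drop (j + 1) ++ o.take j).take sI.toNat).length = 0 by omega]
      simp
    intro k hk
    have hkn : k < numbers.length := by
      rw [hglen] at hk
      exact hk
    have he : (gStep numbers o i)[k]? = some ((gStep numbers o i)[k]) :=
      List.getElem?_eq_getElem hk
    by_cases hks : k = sI.toNat
    · subst hks
      have heqi : (gStep numbers o i)[sI.toNat]'hk = i := by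
        rw [he] at hgsN
        exact Option.some.inj hgsN
      rw [heqi, hB]
      rw [List.getElem?_set_self (by rw [ihlen, hlen]; omega)]
      rw [hsN]
    · have hei : (gStep numbers o i)[k]'hk ≠ i := by
        intro hcon
        apply hks
        have hsk : sI.toNat < (gStep numbers o i).length := by omega
        have heqs : (gStep numbers o i)[sI.toNat]'hsk = i := by
          have := List.getElem?_eq_getElem hsk
          rw [this] at hgsN
          exact Option.some.inj hgsN
        exact (List.Nodup.getElem_inj_iff hgnodup).1 (hcon.trans heqs.symm)
      set e := (gStep numbers o i)[k]'hk with hedef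
      have he0 : 0 ≤ e := by
        have := (hgperm.mem_iff).1 (List.getElem_mem hk)
        exact (PySem.List.mem_pyRange_one.1 this).1
      have helt : e < (numbers.length : Int) := by
        have := (hgperm.mem_iff).1 (List.getElem_mem hk)
        exact (PySem.List.mem_pyRange_one.1 this).2
      -- e = rest[t] with t = k or k - 1
      have ht' : ∃ t : Nat, ((t < sI.toNat ∧ t = k) ∨ (sI.toNat ≤ t ∧ t + 1 = k)) ∧
          (o.drop (j + 1) ++ o.take j)[t]? = some e := by
        rw [hgStep] at he
        rcases lt_or_gt_of_ne hks with hlt | hgt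
        · rw [List.getElem?_append_left (by omega)] at he
          rw [List.getElem?_take, if_pos hlt] at he
          exact ⟨k, Or.inl ⟨hlt, rfl⟩, he⟩
        · rw [List.getElem?_append_right (by omega)] at he
          rw [show k - ((o.drop (j + 1) ++ o.take j).take sI.toNat).length
              = (k - sI.toNat - 1) + 1 by omega] at he
          rw [List.getElem?_cons_succ] at he
          rw [List.getElem?_drop] at he
          exact ⟨sI.toNat + (k - sI.toNat - 1), Or.inr ⟨by omega, by omega⟩, he⟩
      obtain ⟨t, htk, hte⟩ := ht'
      have htlt : t < numbers.length - 1 := by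
        rcases htk with ⟨h', rfl⟩ | ⟨h', h''⟩ <;> omega
      -- e = o[q] with r = (q - j - 1) % n = t
      have hq : ∃ q : Nat, q < o.length ∧ o[q]? = some e ∧
          PySem.Int.mod ((q : Int) - (j : Int) - 1) ((numbers.length : Int)) = (t : Int) := by
        rcases lt_or_ge t (o.length - 1 - j) with hcase | hcase
        · refine ⟨j + 1 + t, by omega, ?_, ?_⟩
          · rw [← pv_rest_lo o j t hcase]
            exact hte
          · rw [show ((j + 1 + t : Nat) : Int) - (j : Int) - 1 = (t : Int) by push_cast; ring]
            rw [PySem.Int.mod_eq_emod_of_pos (by positivity)]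
            rw [Int.emod_eq_of_lt (by positivity) (by exact_mod_cast (by omega : t < numbers.length))]
        · refine ⟨t - (o.length - 1 - j), by omega, ?_, ?_⟩
          · rw [← pv_rest_hi o j t hjlt hcase (by omega)]
            exact hte
          · rw [show ((t - (o.length - 1 - j) : Nat) : Int) - (j : Int) - 1
                = (t : Int) - (numbers.length : Int) by
              push_cast [Nat.cast_sub (by omega : o.length - 1 - j ≤ t),
                Nat.cast_sub (by omega : 1 + j ≤ o.length)]
              have h2 : (o.length : Int) = (numbers.length : Int) := by exact_mod_cast olen
              omega]
            rw [PySem.Int.mod_eq_emod_of_pos (by positivity)]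
            rw [Int.sub_emod, Int.emod_self, sub_zero, Int.emod_emod_of_dvd _ dvd_rfl]
            rw [Int.emod_eq_of_lt (by positivity) (by exact_mod_cast (by omega : t < numbers.length))]
      obtain ⟨q, hqlt, hqe, hqmod⟩ := hq
      have hoq : o[q]'hqlt = e := by
        have := List.getElem?_eq_getElem hqlt
        rw [this] at hqe
        exact Option.some.inj hqe
      have hposq : pos[e.toNat]? = some (q : Int) := by
        have h := hinv q hqlt
        rw [hoq] at h
        exact h
      have hGq : G (q : Int) = (k : Int) := by
        rw [hG]
        simp only [hqmod]
        rcases htk with ⟨hlt, rfl⟩ | ⟨hge, hk1⟩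
        · rw [if_neg (by omega)]
        · rw [if_pos (by omega)]
          omega
      rw [hB]
      rw [List.getElem?_set_ne (by omega)]
      rw [ihget e.toNat]
      rw [if_pos ⟨by omega, by rw [Int.toNat_of_nonneg he0]; exact hei⟩]
      rw [hposq, Option.map_some, hGq]

-- one full round preserves the inverse invariant
theorem pv_posRound (numbers : List Int) (h1 : numbers.length = 1 → numbers = [0])
    (pos o : List Int)
    (hlen : pos.length = numbers.length)
    (hinv : pvInv o pos)
    (hperm : o.Perm (PySem.List.pyRange 0 ((numbers.length : Int)) 1)) :
    ((PySem.List.pyRange 0 ((numbers.length : Int)) 1).foldl (posStepB numbers) pos).length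
        = numbers.length
      ∧ pvInv (gRound numbers o)
          ((PySem.List.pyRange 0 ((numbers.length : Int)) 1).foldl (posStepB numbers) pos)
      ∧ (gRound numbers o).Perm (PySem.List.pyRange 0 ((numbers.length : Int)) 1) := by
  have hR := pv_foldl_rel (PySem.List.pyRange 0 ((numbers.length : Int)) 1)
      (posStepB numbers) (gStep numbers)
      (fun p c => p.length = numbers.length ∧ pvInv c p
        ∧ c.Perm (PySem.List.pyRange 0 ((numbers.length : Int)) 1))
      (fun b c x hx hbc => by
        obtain ⟨hx1, hx2⟩ := PySem.List.mem_pyRange_one.1 hx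
        obtain ⟨hl, hi, hp⟩ := hbc
        obtain ⟨hl', hi'⟩ := pv_posStep numbers h1 c b x hp hl hi hx1 hx2
        exact ⟨hl', hi', (pv_step numbers h1 c x hp hx1 hx2).2⟩)
      _ _ ⟨hlen, hinv, hperm⟩
  exact ⟨hR.1, hR.2.1, hR.2.2⟩

-- the final scatter reads the answer off the inverse permutation
theorem pv_scatter_aux (numbers o pos : List Int)
    (hperm : o.Perm (PySem.List.pyRange 0 ((numbers.length : Int)) 1))
    (hlen : pos.length = numbers.length)
    (hinv : pvInv o pos) :
    ∀ (M : Nat), M ≤ numbers.length →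
      ((pvCast M).foldl
          (fun out i => PySem.List.pySetD out (PySem.List.pyGetD pos i 0)
            (PySem.List.pyGetD numbers i 0)) (List.replicate numbers.length 0)).length
        = numbers.length
      ∧ ∀ k (hk : k < o.length),
          ((pvCast M).foldl
              (fun out i => PySem.List.pySetD out (PySem.List.pyGetD pos i 0)
                (PySem.List.pyGetD numbers i 0)) (List.replicate numbers.length 0))[k]?
            = some (if o[k] < (M : Int) then PySem.List.pyGetD numbers (o[k]) 0 else 0) := by
  have olen : o.length = numbers.length := by
    simpa [PySem.List.length_pyRange_one] using hperm.length_eq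
  have onodup : o.Nodup := (hperm.nodup_iff).2 (PySem.List.nodup_pyRange_one _ _)
  have obnd : ∀ k (hk : k < o.length), 0 ≤ o[k] ∧ o[k] < (numbers.length : Int) := by
    intro k hk
    exact PySem.List.mem_pyRange_one.1 ((hperm.mem_iff).1 (List.getElem_mem hk))
  intro M
  induction M with
  | zero =>
    intro _
    refine ⟨by simp [pvCast], fun k hk => ?_⟩
    have := (obnd k hk).1
    rw [if_neg (by omega)]
    simp only [pvCast, List.foldl_nil]
    rw [List.getElem?_replicate, if_pos (by omega)]
  | succ M ih =>
    intro hM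
    obtain ⟨ihlen, ihget⟩ := ih (by omega)
    rw [show pvCast (M + 1) = pvCast M ++ [(M : Int)] from rfl, List.foldl_append]
    simp only [List.foldl_cons, List.foldl_nil]
    set outM := (pvCast M).foldl
      (fun out i => PySem.List.pySetD out (PySem.List.pyGetD pos i 0)
        (PySem.List.pyGetD numbers i 0)) (List.replicate numbers.length 0) with hout
    have hmem : (M : Int) ∈ o := by
      apply (hperm.mem_iff).2
      apply PySem.List.mem_pyRange_one.2
      constructor
      · positivity
      · exact_mod_cast hM
    obtain ⟨k0, hk0, hok0⟩ := List.mem_iff_getElem.1 hmem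
    have hposM : PySem.List.pyGetD pos (M : Int) 0 = (k0 : Int) := by
      apply pv_getD_of_some pos 0 (by positivity)
      have h := hinv k0 hk0
      rw [hok0] at h
      exact h
    rw [hposM, PySem.List.pySetD_of_nonneg _ _ (by positivity)]
    simp only [Int.toNat_natCast]
    have hcastM : ((M + 1 : Nat) : Int) = (M : Int) + 1 := by push_cast; ring
    refine ⟨by rw [List.length_set, ihlen], fun k hk => ?_⟩
    by_cases hkk : k = k0
    · subst hkk
      rw [List.getElem?_set_self (by rw [ihlen]; omega)]
      rw [hok0, hcastM, if_pos (by omega)]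
    · have hne : o[k] ≠ (M : Int) := by
        intro hcon
        apply hkk
        exact (List.Nodup.getElem_inj_iff onodup).1 (by rw [hcon, hok0])
      rw [List.getElem?_set_ne (by omega), ihget k hk, hcastM]
      by_cases hlt : o[k] < (M : Int)
      · rw [if_pos hlt, if_pos (by omega)]
      · rw [if_neg hlt, if_neg (by omega)]

theorem pv_scatter (numbers o pos : List Int)
    (hperm : o.Perm (PySem.List.pyRange 0 ((numbers.length : Int)) 1))
    (hlen : pos.length = numbers.length)
    (hinv : pvInv o pos) :
    (PySem.List.pyRange 0 ((numbers.length : Int)) 1).foldl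
        (fun out i => PySem.List.pySetD out (PySem.List.pyGetD pos i 0)
          (PySem.List.pyGetD numbers i 0)) (PySem.List.pyRepeat [0] ((numbers.length : Int)))
      = o.map (fun e => PySem.List.pyGetD numbers e 0) := by
  have olen : o.length = numbers.length := by
    simpa [PySem.List.length_pyRange_one] using hperm.length_eq
  have obnd : ∀ k (hk : k < o.length), 0 ≤ o[k] ∧ o[k] < (numbers.length : Int) := by
    intro k hk
    exact PySem.List.mem_pyRange_one.1 ((hperm.mem_iff).1 (List.getElem_mem hk))
  rw [PySem.List.pyRepeat_singleton, Int.toNat_natCast, pv_pyRange_cast]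
  obtain ⟨hl, hg⟩ := pv_scatter_aux numbers o pos hperm hlen hinv numbers.length le_rfl
  apply List.ext_getElem?
  intro k
  by_cases hk : k < o.length
  · rw [hg k hk, if_pos (obnd k hk).2]
    rw [List.getElem?_map, List.getElem?_eq_getElem hk]
    rfl
  · rw [List.getElem?_eq_none (by omega), List.getElem?_eq_none (by simp; omega)]

-- the initial position array is the inverse of the initial order
theorem pv_init_inv (n : Nat) :
    pvInv (PySem.List.pyRange 0 (n : Int) 1) (PySem.List.pyRange 0 (n : Int) 1) := by
  intro k hk
  have hkn : k < n := by
    simpa [PySem.List.length_pyRange_one] using hk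
  rw [PySem.List.getElem_pyRange_one]
  rw [show ((0 : Int) + (k : Int)).toNat = k by omega]
  rw [List.getElem?_eq_getElem (by simpa [PySem.List.length_pyRange_one] using hkn)]
  rw [PySem.List.getElem_pyRange_one]
  simp

-- B = map of the ghost (assembled)
theorem pv_B (numbers : List Int) (cnt : Int)
    (h1 : 1 ≤ cnt → numbers.length = 1 → numbers = [0]) :
    mix_process_alt numbers cnt
      = (gFinal numbers cnt).map (fun e => PySem.List.pyGetD numbers e 0) := by
  simp only [mix_process_alt, gFinal]
  have hlen0 : (PySem.List.pyRange 0 ((numbers.length : Int)) 1).length = numbers.length := by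
    simp [PySem.List.length_pyRange_one]
  have hfin : ((PySem.List.pyRange 0 cnt 1).foldl
        (fun pos _ => (PySem.List.pyRange 0 ((numbers.length : Int)) 1).foldl
          (posStepB numbers) pos) (PySem.List.pyRange 0 ((numbers.length : Int)) 1)).length
          = numbers.length
      ∧ pvInv ((PySem.List.pyRange 0 cnt 1).foldl (fun o _ => gRound numbers o)
            (PySem.List.pyRange 0 ((numbers.length : Int)) 1))
          ((PySem.List.pyRange 0 cnt 1).foldl
            (fun pos _ => (PySem.List.pyRange 0 ((numbers.length : Int)) 1).foldl
              (posStepB numbers) pos) (PySem.List.pyRange 0 ((numbers.length : Int)) 1))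
      ∧ ((PySem.List.pyRange 0 cnt 1).foldl (fun o _ => gRound numbers o)
            (PySem.List.pyRange 0 ((numbers.length : Int)) 1)).Perm
          (PySem.List.pyRange 0 ((numbers.length : Int)) 1) := by
    rcases le_or_gt cnt 0 with hc | hc
    · rw [PySem.List.pyRange_one_eq_nil hc]
      exact ⟨hlen0, pv_init_inv numbers.length, List.Perm.refl _⟩
    · exact pv_foldl_rel (PySem.List.pyRange 0 cnt 1)
        (fun pos _ => (PySem.List.pyRange 0 ((numbers.length : Int)) 1).foldl
          (posStepB numbers) pos)
        (fun o _ => gRound numbers o)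
        (fun p c => p.length = numbers.length ∧ pvInv c p
          ∧ c.Perm (PySem.List.pyRange 0 ((numbers.length : Int)) 1))
        (fun b c x _ hbc =>
          pv_posRound numbers (h1 (by omega)) b c hbc.1 hbc.2.1 hbc.2.2)
        _ _ ⟨hlen0, pv_init_inv numbers.length, List.Perm.refl _⟩
  exact pv_scatter numbers _ _ hfin.2.2 hfin.1 hfin.2.1

-- ===== VERDICT (by name: the statement is the Claim_ definition above) =====
theorem mix_process_spec : Claim_equal_mix_process := by
  intro numbers cnt _dom hpre
  unfold Pre_mix_process at hpre
  unfold Spec_mix_process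
  have h1 : 1 ≤ cnt → numbers.length = 1 → numbers = [0] := by
    intro hc hl
    by_contra hne
    exact hpre ⟨hl, hc, hne⟩
  rw [(pv_A numbers cnt h1).1, pv_B numbers cnt h1]
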